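-- pv_equiv track=rewrite | github.com/rhyn0/LeetCode-Problems | algorithms/image_overlap/overlap_image.py | largestOverlap
-- ===== SOURCE A (Python) =====
-- from collections import defaultdict
-- from collections.abc import Generator
--
-- def largestOverlap(  # spec
--
--     img1: list[list[int]],
--     img2: list[list[int]],
-- ) -> int:
--     """Return largest overlap possible between two images.
--
--     Given two images represented as binary matrices, find the biggest overlap
--     on 'pixels' where the value is 1.
--     Images can be shifted in any way up/down, left/right for any number
--     of moves but no rotations.
--
--     Args:
--         img1 (List[List[int]]): Image 1
--         img2 (List[List[int]]): Image 2
--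
--     Returns:
--         int: Maximum number of pixels that overlap between images
--     """
--
--     def ones_positions(
--         image: list[list[int]],
--     ) -> Generator[tuple[int, int], None, None]:
--         return (
--             (row_ind, col)
--             for row_ind, row in enumerate(image)
--             for col, val in enumerate(row)
--             if val == 1
--         )
--
--     transform_vectors = defaultdict(int)
--
--     for x_a, y_a in ones_positions(img1):
--         for x_b, y_b in ones_positions(img2):
--             curr_transform_vec = (x_b - x_a, y_b - y_a)
--             transform_vectors[curr_transform_vec] += 1
--
--     if not transform_vectors:
--         return 0
--     return max(transform_vectors.values())
-- ===== SOURCE B (Python) =====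
-- def largestOverlap(
--     img1: list[list[int]],
--     img2: list[list[int]],
-- ) -> int:
--     """Brute-force shift-and-count: for every shift (dx, dy), count the
--     1-pixels of img1 that land on a 1-pixel of img2, and return the maximum."""
--
--     def pix(image, x, y):
--         return (
--             0 <= x < len(image)
--             and 0 <= y < len(image[x])
--             and image[x][y] == 1
--         )
--
--     def shift_count(dx, dy):
--         cnt = 0
--         for i, row in enumerate(img1):
--             for j, val in enumerate(row):
--                 if val == 1 and pix(img2, i + dx, j + dy):
--                     cnt += 1
--         return cnt
--
--     rows1, rows2 = len(img1), len(img2)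
--     cols1 = 0
--     for row in img1:
--         cols1 = max(cols1, len(row))
--     cols2 = 0
--     for row in img2:
--         cols2 = max(cols2, len(row))
--
--     best = 0
--     for dx in range(-(rows1 - 1), rows2):
--         for dy in range(-(cols1 - 1), cols2):
--             best = max(best, shift_count(dx, dy))
--     return best
-- ===== Notes on version B (the rewrite author's own statement) =====
-- stated objective: alternative
-- what changed: Replaces A's defaultdict histogram over translation vectors of all pairs of 1-pixels by a brute-force scan over every shift (dx, dy), counting bounds-checked overlapping 1-pixels per shift and taking the maximum.
import Mathlib
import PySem

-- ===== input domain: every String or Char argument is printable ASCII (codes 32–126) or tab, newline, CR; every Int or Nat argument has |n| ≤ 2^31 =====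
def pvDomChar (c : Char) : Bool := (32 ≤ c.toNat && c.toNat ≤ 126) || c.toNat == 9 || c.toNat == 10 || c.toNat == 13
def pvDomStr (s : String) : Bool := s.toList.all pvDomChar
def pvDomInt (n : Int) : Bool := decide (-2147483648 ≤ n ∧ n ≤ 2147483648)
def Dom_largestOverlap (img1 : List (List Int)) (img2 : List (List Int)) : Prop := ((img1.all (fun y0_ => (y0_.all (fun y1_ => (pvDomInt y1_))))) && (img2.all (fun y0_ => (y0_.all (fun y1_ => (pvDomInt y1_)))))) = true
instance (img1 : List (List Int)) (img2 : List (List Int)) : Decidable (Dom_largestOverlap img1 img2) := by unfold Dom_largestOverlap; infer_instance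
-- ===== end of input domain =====

-- B replaces A's translation-vector histogram by a brute-force scan over all shifts
-- (count overlapping 1-pixels for every (dx, dy), take the maximum); objective: alternative.

-- ===== PORT A =====
-- A's generator ones_positions: (row, col) pairs of the 1-pixels, in row-major order
def pvOnes (img : List (List Int)) : List (Int × Int) :=
  (PySem.List.enumerate img 0).flatMap (fun p =>
    ((PySem.List.enumerate p.2 0).filter (fun q => q.2 == 1)).map (fun q => (p.1, q.1)))

def largestOverlap (img1 : List (List Int)) (img2 : List (List Int)) : Int :=
  let tv : PySem.Dict (Int × Int) Int :=
    (pvOnes img1).foldl (fun d a =>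
      (pvOnes img2).foldl (fun d b => d.modify (b.1 - a.1, b.2 - a.2) 0 (· + 1)) d)
      PySem.Dict.empty
  match tv.values with
  | [] => 0                      -- "if not transform_vectors: return 0"
  | v :: t => t.foldl max v      -- "max(transform_vectors.values())"

-- ===== PORT B =====
-- helper pix: bounds-checked pixel test (short-circuit, exactly B's python)
def pvPix (img : List (List Int)) (x : Int) (y : Int) : Bool :=
  decide (0 ≤ x) && decide (x < (img.length : Int)) &&
    (decide (0 ≤ y) && decide (y < ((img.getD x.toNat []).length : Int)) &&
     ((img.getD x.toNat []).getD y.toNat 0 == 1))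

-- helper shift_count: overlapping 1-pixels at shift (dx, dy)
def pvShiftCount (img1 : List (List Int)) (img2 : List (List Int)) (dx : Int) (dy : Int) : Int :=
  (PySem.List.enumerate img1 0).foldl (fun cnt p =>
    (PySem.List.enumerate p.2 0).foldl (fun cnt q =>
      if q.2 == 1 && pvPix img2 (p.1 + dx) (q.1 + dy) then cnt + 1 else cnt) cnt) 0

def largestOverlap_alt (img1 : List (List Int)) (img2 : List (List Int)) : Int :=
  let rows1 : Int := img1.length
  let rows2 : Int := img2.length
  let cols1 : Int := img1.foldl (fun acc row => max acc (row.length : Int)) 0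
  let cols2 : Int := img2.foldl (fun acc row => max acc (row.length : Int)) 0
  (PySem.List.pyRange (-(rows1 - 1)) rows2 1).foldl (fun best dx =>
    (PySem.List.pyRange (-(cols1 - 1)) cols2 1).foldl (fun best dy =>
      max best (pvShiftCount img1 img2 dx dy)) best) 0

-- ===== PRECONDITION & SPEC =====
def Spec_largestOverlap (img1 : List (List Int)) (img2 : List (List Int)) (out : Int) : Prop := out = largestOverlap_alt img1 img2
instance (img1 : List (List Int)) (img2 : List (List Int)) (out : Int) : Decidable (Spec_largestOverlap img1 img2 out) := by unfold Spec_largestOverlap; infer_instance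

-- ===== CLAIM (what is proved, stated in full; the proofs are below) =====
def Claim_equal_largestOverlap : Prop := ∀ (img1 : List (List Int)) (img2 : List (List Int)), Dom_largestOverlap img1 img2 → Spec_largestOverlap img1 img2 (largestOverlap img1 img2)

-- ===== LEMMAS AND PROOFS =====

-- the multiset of translation vectors A histograms: one per (1-pixel of img1, 1-pixel of img2)
def pvVec (img1 : List (List Int)) (img2 : List (List Int)) : List (Int × Int) :=
  (pvOnes img1).flatMap (fun a => (pvOnes img2).map (fun b => (b.1 - a.1, b.2 - a.2)))

-- the grid of shifts B scans, flattened
def pvGrid (img1 : List (List Int)) (img2 : List (List Int)) : List (Int × Int) :=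
  (PySem.List.pyRange (-((img1.length : Int) - 1)) ((img2.length : Int)) 1).flatMap
    (fun dx =>
      (PySem.List.pyRange (-((img1.foldl (fun acc row => max acc (row.length : Int)) 0) - 1))
        (img2.foldl (fun acc row => max acc (row.length : Int)) 0) 1).map (fun dy => (dx, dy)))

theorem mem_pvOnes (img : List (List Int)) (p : Int × Int) :
    p ∈ pvOnes img ↔ pvPix img p.1 p.2 = true := by
  simp only [pvOnes, List.mem_flatMap, List.mem_map, List.mem_filter,
    PySem.List.mem_enumerate_iff, pvPix, Bool.and_eq_true, decide_eq_true_eq, beq_iff_eq]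
  constructor
  · rintro ⟨pr, ⟨k, hk, rfl⟩, q, ⟨⟨j, hj, rfl⟩, hv⟩, rfl⟩
    simp only [zero_add] at *
    have hkn : ((k : Int)).toNat = k := Int.toNat_natCast k
    have hjn : ((j : Int)).toNat = j := Int.toNat_natCast j
    simp only [hkn, hjn, List.getD_eq_getElem _ _ hk]
    refine ⟨⟨by omega, by exact_mod_cast hk⟩, ⟨by omega, by exact_mod_cast hj⟩, ?_⟩
    rw [List.getD_eq_getElem _ _ hj]; exact hv
  · rintro ⟨⟨h0x, hx⟩, ⟨h0y, hy⟩, hval⟩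
    have hk : p.1.toNat < img.length := by omega
    have hj : p.2.toNat < (img.getD p.1.toNat []).length := by omega
    rw [List.getD_eq_getElem _ _ hk] at hj hy hval
    rw [List.getD_eq_getElem _ _ hj] at hval
    refine ⟨(0 + (p.1.toNat : Int), img[p.1.toNat]), ⟨p.1.toNat, hk, rfl⟩,
      (0 + (p.2.toNat : Int), img[p.1.toNat][p.2.toNat]), ⟨⟨p.2.toNat, hj, rfl⟩, hval⟩, ?_⟩
    rw [Prod.ext_iff]
    constructor <;> simp <;> omega

theorem pvOnes_chunk_fst (pr : Int × List Int) (z : Int × Int)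
    (hz : z ∈ ((PySem.List.enumerate pr.2 0).filter (fun q => q.2 == 1)).map (fun q => (pr.1, q.1))) :
    z.1 = pr.1 := by
  simp only [List.mem_map, List.mem_filter] at hz
  obtain ⟨q, _, rfl⟩ := hz
  rfl

theorem nodup_pvOnes (img : List (List Int)) : (pvOnes img).Nodup := by
  refine List.nodup_flatMap.mpr ⟨?_, ?_⟩
  swap
  · refine (PySem.List.pairwise_lt_enumerate img 0).imp ?_
    intro a b hab z hza hzb
    have h1 := pvOnes_chunk_fst a z hza
    have h2 := pvOnes_chunk_fst b z hzb
    omega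
  · intro pr _
    have hpw : ((PySem.List.enumerate pr.2 0).filter (fun q => q.2 == 1)).Pairwise
        (fun p q => p.1 < q.1) :=
      (PySem.List.pairwise_lt_enumerate pr.2 0).filter _
    rw [List.Nodup, List.pairwise_map]
    exact hpw.imp (fun h => by simp only [ne_eq, Prod.mk.injEq, not_and]; intro _; omega)

theorem count_pvOnes (img : List (List Int)) (p : Int × Int) :
    (pvOnes img).count p = if pvPix img p.1 p.2 then 1 else 0 := by
  by_cases h : pvPix img p.1 p.2 = true
  · rw [if_pos h]
    exact List.count_eq_one_of_mem (nodup_pvOnes img) ((mem_pvOnes img p).mpr h)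
  · rw [if_neg h]
    exact List.count_eq_zero_of_not_mem (fun hm => h ((mem_pvOnes img p).mp hm))

theorem shiftCount_eq (img1 img2 : List (List Int)) (dx dy : Int) :
    pvShiftCount img1 img2 dx dy = ((pvVec img1 img2).count (dx, dy) : Int) := by
  have hL : pvShiftCount img1 img2 dx dy =
      ((PySem.List.enumerate img1 0).map (fun p =>
        (((PySem.List.enumerate p.2 0).countP
          (fun q => q.2 == 1 && pvPix img2 (p.1 + dx) (q.1 + dy))) : Int))).sum := by
    unfold pvShiftCount
    have hin : ∀ (cnt : Int) (p : Int × List Int),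
        (PySem.List.enumerate p.2 0).foldl
          (fun cnt q => if q.2 == 1 && pvPix img2 (p.1 + dx) (q.1 + dy) then cnt + 1 else cnt) cnt
        = cnt + (((PySem.List.enumerate p.2 0).countP
            (fun q => q.2 == 1 && pvPix img2 (p.1 + dx) (q.1 + dy))) : Int) :=
      fun cnt p => PySem.List.foldl_if_add_one _ _ _
    simp only [hin]
    rw [PySem.List.foldl_add, zero_add]
  rw [hL, pvVec, List.count_flatMap]
  simp only [Function.comp_def]
  have hper : ∀ a : Int × Int,
      ((pvOnes img2).map (fun b => (b.1 - a.1, b.2 - a.2))).count (dx, dy)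
        = if pvPix img2 (a.1 + dx) (a.2 + dy) then 1 else 0 := by
    intro a
    have hinj : Function.Injective (fun b : Int × Int => (b.1 - a.1, b.2 - a.2)) := by
      intro x y h
      simp only [Prod.mk.injEq] at h
      rw [Prod.ext_iff]; omega
    have hdxy : ((dx, dy) : Int × Int)
        = (fun b : Int × Int => (b.1 - a.1, b.2 - a.2)) (a.1 + dx, a.2 + dy) := by
      simp
    rw [hdxy, List.count_map_of_injective _ _ hinj]
    exact count_pvOnes img2 (a.1 + dx, a.2 + dy)
  simp only [hper]
  -- push the Nat cast through the sum, then reshape the sum over pvOnes into the nested sum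
  rw [Nat.cast_list_sum, List.map_map]
  have : ((pvOnes img1).map (fun a => ((if pvPix img2 (a.1 + dx) (a.2 + dy) then 1 else 0 : Nat) : Int))).sum
      = ((pvOnes img1).map (fun a => if pvPix img2 (a.1 + dx) (a.2 + dy) then (1 : Int) else 0)).sum := by
    congr 1
    apply List.map_congr_left
    intro a _
    split <;> simp
  rw [show (Nat.cast ∘ fun a : Int × Int => if pvPix img2 (a.1 + dx) (a.2 + dy) then 1 else 0)
      = (fun a : Int × Int => ((if pvPix img2 (a.1 + dx) (a.2 + dy) then 1 else 0 : Nat) : Int)) from rfl,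
    this]
  unfold pvOnes
  rw [List.map_flatMap, List.flatMap_def, List.sum_flatten, List.map_map]
  congr 1
  apply List.map_congr_left
  intro pr _
  simp only [Function.comp_def]
  rw [List.map_map]
  have hcomp : ((fun a : Int × Int => if pvPix img2 (a.1 + dx) (a.2 + dy) then (1:Int) else 0)
      ∘ (fun q : Int × Int => (pr.1, q.1)))
      = fun q : Int × Int => if pvPix img2 (pr.1 + dx) (q.1 + dy) then (1:Int) else 0 := rfl
  rw [hcomp, PySem.List.sum_map_ite_one_zero, List.countP_filter]
  congr 1
  apply List.countP_congr
  intro q _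
  rw [Bool.and_comm]

theorem pvOnes_bounds (img : List (List Int)) (a : Int × Int) (ha : a ∈ pvOnes img) :
    0 ≤ a.1 ∧ a.1 < (img.length : Int) ∧ 0 ≤ a.2 ∧
      a.2 < img.foldl (fun acc row => max acc (row.length : Int)) 0 := by
  have h := (mem_pvOnes img a).mp ha
  simp only [pvPix, Bool.and_eq_true, decide_eq_true_eq] at h
  obtain ⟨⟨h0x, hx⟩, ⟨h0y, hy⟩, _⟩ := h
  have hk : a.1.toNat < img.length := by omega
  rw [List.getD_eq_getElem _ _ hk] at hy
  have hmem : img[a.1.toNat] ∈ img := List.getElem_mem hk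
  have hle := (PySem.List.le_foldl_max_int img (fun r => (r.length : Int)) 0).2 _ hmem
  exact ⟨h0x, hx, h0y, by omega⟩

theorem pvVec_mem_grid (img1 img2 : List (List Int)) (v : Int × Int)
    (hv : v ∈ pvVec img1 img2) : v ∈ pvGrid img1 img2 := by
  simp only [pvVec, List.mem_flatMap, List.mem_map] at hv
  obtain ⟨a, ha, b, hb, rfl⟩ := hv
  obtain ⟨ha1, ha2, ha3, ha4⟩ := pvOnes_bounds img1 a ha
  obtain ⟨hb1, hb2, hb3, hb4⟩ := pvOnes_bounds img2 b hb
  simp only [pvGrid, List.mem_flatMap, List.mem_map, PySem.List.mem_pyRange_one]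
  exact ⟨b.1 - a.1, ⟨by omega, by omega⟩, b.2 - a.2, ⟨by omega, by omega⟩, rfl⟩

theorem largestOverlap_alt_eq_foldl (img1 img2 : List (List Int)) :
    largestOverlap_alt img1 img2 =
      ((pvGrid img1 img2).map (fun g => pvShiftCount img1 img2 g.1 g.2)).foldl max 0 := by
  unfold largestOverlap_alt pvGrid
  rw [List.foldl_map, List.foldl_flatMap]
  simp only [List.foldl_map]

-- ===== VERDICT (by name: the statement is the Claim_ definition above) =====
theorem largestOverlap_spec : Claim_equal_largestOverlap := by
  intro img1 img2 _
  unfold Spec_largestOverlap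
  have hdict : ((pvOnes img1).foldl (fun d a =>
      (pvOnes img2).foldl (fun d b => d.modify (b.1 - a.1, b.2 - a.2) 0 (· + 1)) d)
      (PySem.Dict.empty : PySem.Dict (Int × Int) Int)) = PySem.Dict.counter (pvVec img1 img2) := by
    rw [PySem.Dict.counter_eq_foldl, pvVec, List.foldl_flatMap]
    simp only [List.foldl_map]
  have hvals : (PySem.Dict.counter (pvVec img1 img2)).values
      = (PySem.Set.ofList (pvVec img1 img2)).map (fun k => ((pvVec img1 img2).count k : Int)) := by
    show (PySem.Dict.counter (pvVec img1 img2)).items.map (·.2) = _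
    rw [PySem.Dict.items_counter, List.map_map]
    rfl
  have hA : largestOverlap img1 img2 =
      (match (PySem.Set.ofList (pvVec img1 img2)).map (fun k => ((pvVec img1 img2).count k : Int)) with
       | [] => (0 : Int)
       | v :: t => t.foldl max v) := by
    unfold largestOverlap
    rw [hdict]
    show (match (PySem.Dict.counter (pvVec img1 img2)).values with
          | [] => (0 : Int)
          | v :: t => t.foldl max v) = _
    rw [hvals]
  rw [hA, largestOverlap_alt_eq_foldl]
  by_cases hnil : pvVec img1 img2 = []
  · have hL0 : ∀ x ∈ (pvGrid img1 img2).map (fun g => pvShiftCount img1 img2 g.1 g.2), x = 0 := by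
      intro x hx
      simp only [List.mem_map] at hx
      obtain ⟨g, _, rfl⟩ := hx
      rw [shiftCount_eq, hnil]
      simp
    rcases PySem.List.foldl_max_mem ((pvGrid img1 img2).map (fun g => pvShiftCount img1 img2 g.1 g.2)) 0 with h | h
    · rw [hnil, h]; rfl
    · rw [hnil, hL0 _ h]; rfl
  · obtain ⟨w, ws, hW⟩ := List.exists_cons_of_ne_nil (l := (PySem.Set.ofList (pvVec img1 img2)).map (fun k => ((pvVec img1 img2).count k : Int))) (by
      intro h
      apply hnil
      rcases hV : pvVec img1 img2 with _ | ⟨v0, vt⟩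
      · rfl
      · exfalso
        have hv0 : v0 ∈ PySem.Set.ofList (pvVec img1 img2) := by
          rw [PySem.Set.mem_ofList, hV]; exact List.mem_cons_self
        rw [List.map_eq_nil_iff] at h
        rw [h] at hv0
        exact (List.not_mem_nil) hv0)
    rw [hW]
    show List.foldl max w ws
        = List.foldl max 0 ((pvGrid img1 img2).map (fun g => pvShiftCount img1 img2 g.1 g.2))
    have hWmem : ∀ y ∈ w :: ws, ∃ k ∈ pvVec img1 img2, y = (((pvVec img1 img2).count k : Nat) : Int) := by
      intro y hy
      rw [← hW] at hy
      simp only [List.mem_map] at hy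
      obtain ⟨k, hk, rfl⟩ := hy
      exact ⟨k, (PySem.Set.mem_ofList _ _).mp hk, rfl⟩
    have hWof : ∀ k ∈ pvVec img1 img2,
        (((pvVec img1 img2).count k : Nat) : Int) ∈ w :: ws := by
      intro k hk
      rw [← hW]
      simp only [List.mem_map]
      exact ⟨k, (PySem.Set.mem_ofList _ _).mpr hk, rfl⟩
    have hAub := PySem.List.le_foldl_max ws w
    have hAmem : ws.foldl max w ∈ w :: ws := by
      rcases PySem.List.foldl_max_mem ws w with h | h
      · rw [h]; exact List.mem_cons_self
      · exact List.mem_cons_of_mem _ h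
    have hBub := PySem.List.le_foldl_max
      ((pvGrid img1 img2).map (fun g => pvShiftCount img1 img2 g.1 g.2)) 0
    have hBmem := PySem.List.foldl_max_mem
      ((pvGrid img1 img2).map (fun g => pvShiftCount img1 img2 g.1 g.2)) 0
    have hcntL : ∀ k ∈ pvVec img1 img2,
        (((pvVec img1 img2).count k : Nat) : Int)
          ∈ (pvGrid img1 img2).map (fun g => pvShiftCount img1 img2 g.1 g.2) := by
      intro k hk
      simp only [List.mem_map]
      refine ⟨k, pvVec_mem_grid img1 img2 k hk, ?_⟩
      rw [shiftCount_eq]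
    have h0A : (0 : Int) ≤ ws.foldl max w := by
      obtain ⟨k, _, hkeq⟩ := hWmem _ hAmem
      rw [hkeq]
      positivity
    apply le_antisymm
    · obtain ⟨k, hkV, hkeq⟩ := hWmem _ hAmem
      rw [hkeq]
      exact hBub.2 _ (hcntL k hkV)
    · rcases hBmem with h | h
      · rw [h]; exact h0A
      · simp only [List.mem_map] at h
        obtain ⟨g, hgG, hg⟩ := h
        rw [← hg, shiftCount_eq]
        by_cases hc : (pvVec img1 img2).count (g.1, g.2) = 0
        · rw [hc]; exact_mod_cast h0A
        · have hgV : ((g.1, g.2) : Int × Int) ∈ pvVec img1 img2 :=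
            List.count_pos_iff.mp (Nat.pos_of_ne_zero hc)
          rcases List.mem_cons.mp (hWof _ hgV) with h' | h'
          · rw [h']; exact hAub.1
          · exact hAub.2 _ h'
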